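-- pv_equiv track=rewrite | github.com/zahar0nnn/pokev2 | scraper.py | _group_pages_into_ranges
-- ===== SOURCE A (Python) =====
-- from typing import List, Dict, Any
--
-- def _group_pages_into_ranges(pages: List[int], max_gap: int = 10) -> List[dict]:
--     """
--     Group consecutive pages into ranges for more efficient processing
--     """
--     if not pages:
--         return []
--
--     pages = sorted(pages)
--     ranges = []
--     current_start = pages[0]
--     current_end = pages[0]
--
--     for i in range(1, len(pages)):
--         if pages[i] - pages[i-1] <= max_gap:
--             # Pages are close enough, extend current range
--             current_end = pages[i]
--         else:
--             # Gap is too large, start new range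
--             ranges.append({
--                 'start': current_start,
--                 'end': current_end,
--                 'count': current_end - current_start + 1
--             })
--             current_start = pages[i]
--             current_end = pages[i]
--
--     # Add the last range
--     ranges.append({
--         'start': current_start,
--         'end': current_end,
--         'count': current_end - current_start + 1
--     })
--
--     return ranges
-- ===== SOURCE B (Python) =====
-- def _group_pages_into_ranges(pages, max_gap=10):
--     """Recursively split the sorted pages at the first oversized gap,
--     emit one range per leading block, and recurse on the remainder."""
--     def split(xs):
--         for i in range(1, len(xs)):
--             if xs[i] - xs[i - 1] > max_gap:
--                 return xs[:i], xs[i:]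
--         return xs, []
--
--     def rec(xs):
--         if not xs:
--             return []
--         head, tail = split(xs)
--         return [{'start': head[0], 'end': head[-1],
--                  'count': head[-1] - head[0] + 1}] + rec(tail)
--
--     return rec(sorted(pages))
-- ===== Notes on version B (the rewrite author's own statement) =====
-- stated objective: alternative
-- what changed: Replaces A's single sweep with a running start/end accumulator by a recursive divide-and-emit algorithm: split the sorted list at the first oversized gap, format the leading block, recurse on the remainder.
import Mathlib
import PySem

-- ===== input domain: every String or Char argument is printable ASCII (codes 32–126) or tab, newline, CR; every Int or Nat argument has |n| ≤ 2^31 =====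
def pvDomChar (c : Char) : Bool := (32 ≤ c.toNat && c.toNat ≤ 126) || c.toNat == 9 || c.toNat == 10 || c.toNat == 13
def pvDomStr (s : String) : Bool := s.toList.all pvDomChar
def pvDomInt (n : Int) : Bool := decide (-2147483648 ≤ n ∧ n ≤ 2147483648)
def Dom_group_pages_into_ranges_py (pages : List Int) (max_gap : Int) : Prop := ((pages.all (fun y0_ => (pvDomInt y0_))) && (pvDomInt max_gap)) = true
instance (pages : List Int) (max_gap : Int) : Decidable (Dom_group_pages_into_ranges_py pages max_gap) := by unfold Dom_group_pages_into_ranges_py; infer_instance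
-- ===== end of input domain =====

-- B replaces A's single accumulator sweep by a recursive divide-and-emit algorithm
-- (split at the first oversized gap, format the leading block, recurse); objective:
-- alternative decomposition, same O(n log n) cost.

-- ===== PORT A =====
-- the dict literal A appends
def pvMkRangeA (s e : Int) : List (String × Int) :=
  [("start", s), ("end", e), ("count", e - s + 1)]

-- A's for-loop over i in range(1, len(pages)); `prev` is pages[i-1] (the element read
-- in the previous iteration), state is (ranges, current_start, current_end).
def pvALoop (max_gap : Int) (ranges : List (List (String × Int))) (cs ce prev : Int) :
    List Int → List (List (String × Int))
  | [] => ranges ++ [pvMkRangeA cs ce]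
  | p :: rest =>
      if p - prev ≤ max_gap then
        pvALoop max_gap ranges cs p p rest
      else
        pvALoop max_gap (ranges ++ [pvMkRangeA cs ce]) p p p rest

def group_pages_into_ranges_py (pages : List Int) (max_gap : Int) : List (List (String × Int)) :=
  if pages = [] then []
  else
    match PySem.List.sorted pages (fun x => x) with
    | [] => []
    | p0 :: rest => pvALoop max_gap [] p0 p0 p0 rest

-- ===== PORT B =====
-- B's `split`: cut the list before the first adjacent pair with gap > max_gap
def pvSplit (max_gap : Int) : List Int → List Int × List Int
  | [] => ([], [])
  | [x] => ([x], [])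
  | x :: y :: rest =>
      if y - x > max_gap then ([x], y :: rest)
      else
        let ht := pvSplit max_gap (y :: rest)
        (x :: ht.1, ht.2)

-- termination measure for pvRec: the tail of a split is strictly shorter
theorem pvSplit_snd_len (max_gap : Int) :
    ∀ (xs : List Int) (x : Int), (pvSplit max_gap (x :: xs)).2.length ≤ xs.length := by
  intro xs
  induction xs with
  | nil => intro x; simp [pvSplit]
  | cons y rest ih =>
      intro x
      by_cases h : y - x > max_gap
      · simp [pvSplit, h]
      · simpa [pvSplit, h] using Nat.le_succ_of_le (ih y)

-- format one block (blocks are always nonempty, so the defaults are never used)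
def pvFmtSeg (s : List Int) : List (String × Int) :=
  [("start", s.headD 0), ("end", s.getLastD 0), ("count", s.getLastD 0 - s.headD 0 + 1)]

-- B's `rec`: emit the leading block, recurse on the remainder
def pvRec (max_gap : Int) : List Int → List (List (String × Int))
  | [] => []
  | x :: xs =>
      let ht := pvSplit max_gap (x :: xs)
      pvFmtSeg ht.1 :: pvRec max_gap ht.2
termination_by l => l.length
decreasing_by
  exact Nat.lt_succ_of_le (pvSplit_snd_len max_gap xs x)

def group_pages_into_ranges_py_alt (pages : List Int) (max_gap : Int) : List (List (String × Int)) :=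
  pvRec max_gap (PySem.List.sorted pages (fun x => x))

-- ===== PRECONDITION & SPEC =====
def Spec_group_pages_into_ranges_py (pages : List Int) (max_gap : Int) (out : List (List (String × Int))) : Prop := out = group_pages_into_ranges_py_alt pages max_gap
instance (pages : List Int) (max_gap : Int) (out : List (List (String × Int))) : Decidable (Spec_group_pages_into_ranges_py pages max_gap out) := by unfold Spec_group_pages_into_ranges_py; infer_instance

-- ===== CLAIM =====
def Claim_equal_group_pages_into_ranges_py : Prop := ∀ (pages : List Int) (max_gap : Int), Dom_group_pages_into_ranges_py pages max_gap → Spec_group_pages_into_ranges_py pages max_gap (group_pages_into_ranges_py pages max_gap)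

-- ===== LEMMAS AND PROOFS =====

-- the first component of a split of a nonempty list keeps its head
theorem pvSplit_fst_head (max_gap : Int) (x : Int) (xs : List Int) :
    ∃ h', (pvSplit max_gap (x :: xs)).1 = x :: h' := by
  cases xs with
  | nil => exact ⟨[], rfl⟩
  | cons y rest =>
      by_cases h : y - x > max_gap
      · exact ⟨[], by simp [pvSplit, h]⟩
      · exact ⟨(pvSplit max_gap (y :: rest)).1, by simp [pvSplit, h]⟩

-- the default of getLast?.getD is irrelevant on a nonempty list
theorem pvGetD_cons (x : Int) (l : List Int) (a b : Int) :
    (x :: l).getLast?.getD a = (x :: l).getLast?.getD b := by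
  cases hl : (x :: l).getLast? with
  | none => simp at hl
  | some v => simp [hl]

-- key invariant: A's loop (with ce = prev, as always holds) equals "format the block
-- started at cs and ending at the last of the current split, then recurse via B"
theorem pvLoop_eq_rec (max_gap : Int) :
    ∀ (rest : List Int) (ranges : List (List (String × Int))) (cs ce : Int),
      pvALoop max_gap ranges cs ce ce rest
        = ranges ++ pvMkRangeA cs ((pvSplit max_gap (ce :: rest)).1.getLastD ce)
            :: pvRec max_gap (pvSplit max_gap (ce :: rest)).2 := by
  intro rest
  induction rest with
  | nil =>
      intro ranges cs ce
      simp [pvALoop, pvSplit, pvRec]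
  | cons p rest ih =>
      intro ranges cs ce
      by_cases hle : p - ce ≤ max_gap
      · have hgt : ¬ p - ce > max_gap := by omega
        obtain ⟨h', hh'⟩ := pvSplit_fst_head max_gap p rest
        simp only [pvALoop, hle, if_pos, pvSplit, hgt, if_neg, not_false_iff]
        rw [ih ranges cs p]
        simp only [hh', List.getLastD_eq_getLast?]
        rw [pvGetD_cons p h' p ce]
        simp [List.getLast?_cons_cons]
      · have hgt : p - ce > max_gap := by omega
        simp only [pvALoop, hle, if_neg, not_false_iff, pvSplit, hgt, if_pos]
        rw [ih (ranges ++ [pvMkRangeA cs ce]) p p]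
        obtain ⟨h', hh'⟩ := pvSplit_fst_head max_gap p rest
        rw [pvRec]
        simp only [hh', pvFmtSeg, pvMkRangeA, List.getLastD_eq_getLast?]
        rw [pvGetD_cons p h' p 0]
        simp

-- ===== VERDICT =====
theorem group_pages_into_ranges_py_spec : Claim_equal_group_pages_into_ranges_py := by
  unfold Claim_equal_group_pages_into_ranges_py
  intro pages max_gap _
  unfold Spec_group_pages_into_ranges_py
  unfold group_pages_into_ranges_py group_pages_into_ranges_py_alt
  by_cases hp : pages = []
  · subst hp
    have hs : PySem.List.sorted ([] : List Int) (fun x => x) = [] :=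
      (PySem.List.sorted_perm ([] : List Int) (fun x : Int => x) false).nil_eq.symm
    simp [hs, pvRec]
  · simp only [hp, if_neg, not_false_iff]
    cases hsort : PySem.List.sorted pages (fun x => x) with
    | nil =>
        have h := PySem.List.sorted_perm pages (fun x : Int => x) false
        rw [hsort] at h
        exact absurd h.nil_eq.symm hp
    | cons p0 rest =>
        show pvALoop max_gap [] p0 p0 p0 rest = pvRec max_gap (p0 :: rest)
        rw [pvLoop_eq_rec max_gap rest [] p0 p0]
        obtain ⟨h', hh'⟩ := pvSplit_fst_head max_gap p0 rest
        rw [pvRec]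
        simp only [hh', pvFmtSeg, pvMkRangeA, List.getLastD_eq_getLast?]
        rw [pvGetD_cons p0 h' p0 0]
        simp
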